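-- pv_equiv track=rewrite | github.com/hard02/litcoder_submissions | For CS - Module 2 and 3 - Contest - Python /Task Scheduling/main.py | min_time_to_complete_tasks
-- ===== SOURCE A (Python) =====
-- def min_time_to_complete_tasks(tasks, workers):
--     def is_valid(mid):
--         current_workers = 1
--         current_time = 0
--
--         for task in tasks:
--             current_time += task
--             if current_time > mid:
--                 current_workers += 1
--                 current_time = task
--
--         return current_workers <= workers
--
--     low, high = max(tasks), sum(tasks)
--
--     while low < high:
--         mid = low + (high - low) // 2
--
--         if is_valid(mid):
--             high = mid
--         else:
--             low = mid + 1
--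
--     return low
-- ===== SOURCE B (Python) =====
-- def min_time_to_complete_tasks(tasks, workers):
--     n = len(tasks)
--     prefix = [0]
--     acc = 0
--     for t in tasks:
--         acc += t
--         prefix.append(acc)
--     k = min(workers, n)
--     dp = prefix[:]  # j = 1: dp[i] = sum of first i tasks
--     for j in range(2, k + 1):
--         ndp = [0] * (n + 1)
--         for i in range(j, n + 1):
--             best = None
--             for p in range(j - 1, i):
--                 cand = max(dp[p], prefix[i] - prefix[p])
--                 if best is None or cand < best:
--                     best = cand
--             ndp[i] = best
--         dp = ndp
--     return dp[n]
-- ===== Notes on version B (the rewrite author's own statement) =====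
-- stated objective: alternative
-- what changed: Replaces binary search on the answer with an O(k*n^2) bottom-up dynamic program over prefix sums (dp[j][i] = minimal possible maximum group sum splitting the first i tasks into j contiguous groups), returning dp[min(workers,n)][n]; Pre_ excludes the empty list (A raises ValueError) and lists with a negative duration when workers < len(tasks), where A's binary-search bracket [max,sum] can be inverted and its value is an accident of that bracket.
-- outside the precondition, e.g. on min_time_to_complete_tasks([0, -1, 5, 2], 2): A returns 5, B returns 4; on min_time_to_complete_tasks([], 2): A raises ValueError, B returns 0
import Mathlib
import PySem

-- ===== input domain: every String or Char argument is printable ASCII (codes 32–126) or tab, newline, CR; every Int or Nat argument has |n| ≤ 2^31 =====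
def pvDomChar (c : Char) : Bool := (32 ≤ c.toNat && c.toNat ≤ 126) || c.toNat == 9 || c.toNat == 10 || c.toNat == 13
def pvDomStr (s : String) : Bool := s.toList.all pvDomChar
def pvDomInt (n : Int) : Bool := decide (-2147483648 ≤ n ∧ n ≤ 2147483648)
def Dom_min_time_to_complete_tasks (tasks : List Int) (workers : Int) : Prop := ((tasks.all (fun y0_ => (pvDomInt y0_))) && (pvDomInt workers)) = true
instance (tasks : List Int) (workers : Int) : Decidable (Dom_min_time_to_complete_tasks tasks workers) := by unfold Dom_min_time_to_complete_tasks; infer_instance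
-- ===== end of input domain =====

-- B replaces A's binary search on the answer by a bottom-up DP over prefix sums
-- (min-max contiguous partition); equivalence is proved on nonempty lists of
-- nonnegative durations (the task's natural domain).

-- ===== PORT A =====
-- the for-loop of A's is_valid, state = (current_workers, current_time)
def pvRun (mid : Int) (st : Int × Int) (tasks : List Int) : Int × Int :=
  tasks.foldl (fun st task =>
    if st.2 + task > mid then (st.1 + 1, task) else (st.1, st.2 + task)) st

def pvA_isValid (tasks : List Int) (workers mid : Int) : Bool :=
  decide ((pvRun mid (1, 0) tasks).1 ≤ workers)

-- the while-loop of A's binary search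
def pvA_loop (tasks : List Int) (workers low high : Int) : Int :=
  if h : low < high then
    let mid := low + PySem.Int.floordiv (high - low) 2
    if pvA_isValid tasks workers mid then pvA_loop tasks workers low mid
    else pvA_loop tasks workers (mid + 1) high
  else low
termination_by (high - low).toNat
decreasing_by
  · simp only [PySem.Int.floordiv_eq_ediv_of_pos (by omega : (0:Int) < 2)]
    omega
  · simp only [PySem.Int.floordiv_eq_ediv_of_pos (by omega : (0:Int) < 2)]
    omega

def min_time_to_complete_tasks (tasks : List Int) (workers : Int) : Int :=
  -- Python max(tasks) raises ValueError on []; that input is outside Pre_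
  match PySem.List.max? tasks (fun y => y) with
  | none => 0
  | some low => pvA_loop tasks workers low tasks.sum

-- ===== PORT B =====
-- B's inner loop: running minimum with a None start
def pvMinFold (f : Int → Int) (ps : List Int) : Option Int :=
  ps.foldl (fun best p =>
    match best with
    | none => some (f p)
    | some b => if f p < b then some (f p) else some b) none

-- best = min over p in range(j-1, i) of max(dp[p], prefix[i] - prefix[p])
def pvB_best (dp pre : List Int) (j i : Int) : Int :=
  (pvMinFold
    (fun p => max (PySem.List.pyGetD dp p 0)
                  (PySem.List.pyGetD pre i 0 - PySem.List.pyGetD pre p 0))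
    (PySem.List.pyRange (j - 1) i 1)).getD 0

-- ndp = [0]*(n+1); for i in range(j, n+1): ndp[i] = best
def pvB_row (dp pre : List Int) (n : Nat) (j : Int) : List Int :=
  (PySem.List.pyRange j ((n : Int) + 1) 1).foldl
    (fun ndp i => ndp.set i.toNat (pvB_best dp pre j i))
    (List.replicate (n + 1) 0)

def min_time_to_complete_tasks_alt (tasks : List Int) (workers : Int) : Int :=
  let n := tasks.length
  let pre := (tasks.foldl (fun (st : List Int × Int) t =>
      (st.1 ++ [st.2 + t], st.2 + t)) (([0], 0) : List Int × Int)).1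
  let k := min workers (n : Int)
  let dp := (PySem.List.pyRange 2 (k + 1) 1).foldl (fun dp j => pvB_row dp pre n j) pre
  PySem.List.pyGetD dp (n : Int) 0

-- ===== PRECONDITION & SPEC =====
-- Pre_ excludes the empty list (A raises ValueError from max([])) and lists holding a
-- negative duration when workers < len(tasks): negative "time to complete a task" is
-- outside the problem's domain and there A's binary-search bracket [max, sum] can be
-- inverted, making its value an accident of that bracket.  (With workers ≥ len(tasks)
-- the two agree for every integer list, so those inputs stay inside the claim.)
def Pre_min_time_to_complete_tasks (tasks : List Int) (workers : Int) : Prop :=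
  tasks ≠ [] ∧ ((∀ t ∈ tasks, 0 ≤ t) ∨ (tasks.length : Int) ≤ workers)
instance (tasks : List Int) (workers : Int) : Decidable (Pre_min_time_to_complete_tasks tasks workers) := by
  unfold Pre_min_time_to_complete_tasks; infer_instance

def pvWitness_min_time_to_complete_tasks : List Int × Int := ([3, 1, 4, 1, 5], 2)

def Spec_min_time_to_complete_tasks (tasks : List Int) (workers : Int) (out : Int) : Prop := out = min_time_to_complete_tasks_alt tasks workers
instance (tasks : List Int) (workers : Int) (out : Int) : Decidable (Spec_min_time_to_complete_tasks tasks workers out) := by unfold Spec_min_time_to_complete_tasks; infer_instance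

-- ===== CLAIM (what is proved, stated in full; the proofs are below) =====
def Claim_equal_min_time_to_complete_tasks : Prop := ∀ (tasks : List Int) (workers : Int), Dom_min_time_to_complete_tasks tasks workers → Pre_min_time_to_complete_tasks tasks workers → Spec_min_time_to_complete_tasks tasks workers (min_time_to_complete_tasks tasks workers)

-- ===== LEMMAS AND PROOFS =====

-- ---- generic notions ----
def pvNonneg (l : List Int) : Prop := ∀ x ∈ l, 0 ≤ x

def pvGCount (m : Int) (l : List Int) : Int := (pvRun m (1, 0) l).1

-- lexicographic "no worse greedy state"
def pvLe (s t : Int × Int) : Prop := s.1 < t.1 ∨ (s.1 = t.1 ∧ s.2 ≤ t.2)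

def pvCanSplit (j : Nat) (l : List Int) (m : Int) : Prop :=
  ∃ gs : List (List Int), gs.length = j ∧ gs.flatten = l ∧ ∀ g ∈ gs, g ≠ [] ∧ g.sum ≤ m

-- ---- pvRun basics ----
theorem pvRun_nil (m : Int) (st : Int × Int) : pvRun m st [] = st := rfl

theorem pvRun_cons (m : Int) (st : Int × Int) (x : Int) (l : List Int) :
    pvRun m st (x :: l) =
      pvRun m (if st.2 + x > m then (st.1 + 1, x) else (st.1, st.2 + x)) l := by
  simp only [pvRun, List.foldl_cons]

theorem pvRun_append (m : Int) (st : Int × Int) (a b : List Int) :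
    pvRun m st (a ++ b) = pvRun m (pvRun m st a) b := by
  simp [pvRun, List.foldl_append]

theorem pvRun_shift (m : Int) (c t d : Int) (l : List Int) :
    pvRun m (c + d, t) l = ((pvRun m (c, t) l).1 + d, (pvRun m (c, t) l).2) := by
  induction l generalizing c t with
  | nil => simp [pvRun_nil]
  | cons x r ih =>
      rw [pvRun_cons, pvRun_cons]
      by_cases h : t + x > m
      · simpa [h, add_right_comm] using ih (c + 1) x
      · simpa [h] using ih c (t + x)

theorem pvRun_count_ge (m : Int) (c t : Int) (l : List Int) :
    c ≤ (pvRun m (c, t) l).1 := by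
  induction l generalizing c t with
  | nil => simp [pvRun_nil]
  | cons x r ih =>
      rw [pvRun_cons]
      by_cases h : t + x > m
      · simp only [h, if_pos, gt_iff_lt]
        calc c ≤ c + 1 := by omega
          _ ≤ _ := by simpa using ih (c+1) x
      · simpa [h] using ih c (t + x)

theorem pvRun_no_break (m : Int) (c t : Int) (l : List Int)
    (hl : pvNonneg l) (hsum : t + l.sum ≤ m) :
    pvRun m (c, t) l = (c, t + l.sum) := by
  induction l generalizing c t with
  | nil => simp [pvRun_nil]
  | cons x r ih =>
      have hx : 0 ≤ x := hl x (by simp)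
      have hrs : (0:Int) ≤ r.sum := List.sum_nonneg (fun y hy => hl y (by simp [hy]))
      have hr : pvNonneg r := fun y hy => hl y (by simp [hy])
      have hsum' : t + x + r.sum ≤ m := by
        simpa [add_assoc] using hsum
      have hnb : ¬ (t + x > m) := by omega
      rw [pvRun_cons]
      simp only [hnb, if_neg, gt_iff_lt, if_false]
      rw [ih c (t + x) hr hsum']
      simp [add_assoc]

-- greedy monotone: a larger cap and a no-worse state stay no worse
theorem pvRun_mono (m m' : Int) (hm : m ≤ m') (l : List Int) (hl : pvNonneg l) :
    ∀ (s s' : Int × Int), pvLe s' s → 0 ≤ s.2 → 0 ≤ s'.2 →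
      pvLe (pvRun m' s' l) (pvRun m s l) := by
  induction l with
  | nil => intro s s' h _ _; simpa [pvRun_nil] using h
  | cons x r ih =>
      rintro ⟨c, t⟩ ⟨c', t'⟩ h hs hs'
      have hx : 0 ≤ x := hl x (by simp)
      have hr : pvNonneg r := fun y hy => hl y (by simp [hy])
      simp only [pvLe] at h hs hs'
      rw [pvRun_cons, pvRun_cons]
      split_ifs with h1 h2 h2 <;>
        · apply ih <;> (try unfold pvLe) <;> (try dsimp only) <;> omega

theorem pvGCount_pos (m : Int) (l : List Int) : 1 ≤ pvGCount m l :=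
  pvRun_count_ge m 1 0 l

theorem pvGCount_mono (m m' : Int) (hm : m ≤ m') (l : List Int) (hl : pvNonneg l) :
    pvGCount m' l ≤ pvGCount m l := by
  have h := pvRun_mono m m' hm l hl (1, 0) (1, 0)
    (Or.inr ⟨rfl, le_refl _⟩) (by norm_num) (by norm_num)
  unfold pvGCount
  rcases h with h | ⟨h, _⟩
  · omega
  · omega

theorem pvGreedy_aux (m : Int) : ∀ (l : List Int), pvNonneg l → (∀ x ∈ l, x ≤ m) →
    ∀ (c t : Int), 0 ≤ t → t ≤ m →
    ∃ (g : List Int) (gs : List (List Int)),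
      l = g ++ gs.flatten ∧ t + g.sum ≤ m ∧ (∀ G ∈ gs, G ≠ [] ∧ G.sum ≤ m) ∧
      (pvRun m (c, t) l).1 = c + gs.length ∧
      (∀ x l', l = x :: l' → t + x ≤ m → g ≠ []) := by
  intro l
  induction l with
  | nil =>
      intro _ _ c t ht htm
      exact ⟨[], [], by simp, by simpa using htm, by simp, by simp [pvRun_nil], by simp⟩
  | cons x r ih =>
      intro hnn hb c t ht htm
      have hx0 : 0 ≤ x := hnn x (by simp)
      have hxm : x ≤ m := hb x (by simp)
      have hr : pvNonneg r := fun y hy => hnn y (by simp [hy])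
      have hbr : ∀ y ∈ r, y ≤ m := fun y hy => hb y (by simp [hy])
      by_cases hcase : t + x > m
      · obtain ⟨g', gs', hflat, hg'sum, hgs', hcount, _⟩ :=
          ih hr hbr (c + 1) x hx0 hxm
        refine ⟨[], (x :: g') :: gs', ?_, by simpa using htm, ?_, ?_, ?_⟩
        · simp [hflat]
        · intro G hG
          rcases List.mem_cons.mp hG with rfl | hG
          · exact ⟨by simp, by simpa [add_assoc] using hg'sum⟩
          · exact hgs' G hG
        · rw [pvRun_cons]
          simp only [hcase, if_pos, gt_iff_lt]
          rw [hcount]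
          simp only [List.length_cons]
          push_cast
          ring
        · intro y l' hyl hyle
          exfalso
          injection hyl with h1 h2
          omega
      · obtain ⟨g', gs', hflat, hg'sum, hgs', hcount, _⟩ :=
          ih hr hbr c (t + x) (by omega) (by omega)
        refine ⟨x :: g', gs', by simp [hflat], by simp; omega, hgs', ?_, by simp⟩
        rw [pvRun_cons]
        simp only [hcase, if_neg, gt_iff_lt, not_lt, if_false]
        exact hcount

-- the greedy partition exists: gcount groups, each nonempty with sum ≤ m
theorem pvGreedy_split (m : Int) (l : List Int) (hl : pvNonneg l) (hb : ∀ x ∈ l, x ≤ m)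
    (hne : l ≠ []) : ∃ gs : List (List Int),
      gs.flatten = l ∧ (∀ g ∈ gs, g ≠ [] ∧ g.sum ≤ m) ∧ (gs.length : Int) = pvGCount m l := by
  obtain ⟨x, r, rfl⟩ := List.exists_cons_of_ne_nil hne
  have hm0 : (0 : Int) ≤ m := le_trans (hl x (by simp)) (hb x (by simp))
  obtain ⟨g, gs, hflat, hgsum, hgs, hcount, hgne⟩ :=
    pvGreedy_aux m (x :: r) hl hb 1 0 (le_refl 0) hm0
  refine ⟨g :: gs, ?_, ?_, ?_⟩
  · simp [hflat]
  · intro G hG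
    rcases List.mem_cons.mp hG with rfl | hG
    · exact ⟨hgne x r rfl (by simpa using hb x (by simp)), by omega⟩
    · exact hgs G hG
  · unfold pvGCount
    rw [hcount]
    simp only [List.length_cons]
    push_cast
    ring

-- the greedy partition is optimal: any feasible split has at least gcount groups
theorem pvGreedy_opt (m : Int) (gs : List (List Int)) (hgs : ∀ g ∈ gs, g ≠ [] ∧ g.sum ≤ m)
    (hnn : pvNonneg gs.flatten) (hne : gs ≠ []) :
    pvGCount m gs.flatten ≤ (gs.length : Int) := by
  induction gs with
  | nil => exact absurd rfl hne
  | cons G gs' ih =>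
      have hGne : G ≠ [] := (hgs G (by simp)).1
      have hGsum : G.sum ≤ m := (hgs G (by simp)).2
      have hGnn : pvNonneg G := fun y hy => hnn y (by simp [hy])
      have hGs0 : (0 : Int) ≤ G.sum := List.sum_nonneg hGnn
      rcases eq_or_ne gs' [] with rfl | hgs'ne
      · unfold pvGCount
        simp only [List.flatten_cons, List.flatten_nil, List.append_nil]
        rw [pvRun_no_break m 1 0 G hGnn (by omega)]
        simp
      · have hflnn : pvNonneg gs'.flatten := fun y hy => hnn y (by simp [hy])
        have hih := ih (fun g hg => hgs g (by simp [hg])) hflnn hgs'ne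
        unfold pvGCount at hih ⊢
        simp only [List.flatten_cons]
        rw [pvRun_append, pvRun_no_break m 1 0 G hGnn (by omega)]
        have hmono := pvRun_mono m m (le_refl m) gs'.flatten hflnn
          (2, 0) (1, 0 + G.sum) (Or.inl (by norm_num)) (by norm_num) (by omega)
        have hshift := pvRun_shift m 1 0 1 gs'.flatten
        have h21 : ((1 : Int) + 1, (0 : Int)) = ((2 : Int), (0 : Int)) := by norm_num
        rw [h21] at hshift
        rcases hmono with hlt | ⟨heq, _⟩ <;>
        · rw [hshift] at *
          simp only [List.length_cons]
          push_cast
          omega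

-- a split's group count is at most the number of elements
theorem pvSplit_len_le (gs : List (List Int)) (hgs : ∀ g ∈ gs, g ≠ []) :
    gs.length ≤ gs.flatten.length := by
  induction gs with
  | nil => simp
  | cons G gs' ih =>
      have hGne : G ≠ [] := hgs G (by simp)
      have h1 : 1 ≤ G.length := Nat.one_le_iff_ne_zero.mpr (by simpa using hGne)
      have := ih (fun g hg => hgs g (by simp [hg]))
      simp only [List.flatten_cons, List.length_append, List.length_cons]
      omega

-- a feasible split into c groups can be padded to any k with c ≤ k ≤ length
theorem pvSplit_pad (m : Int) (l : List Int) (hl : pvNonneg l) :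
    ∀ (k c : Nat), pvCanSplit c l m → c ≤ k → k ≤ l.length → pvCanSplit k l m := by
  intro k
  induction k with
  | zero => intro c hc hck _; interval_cases c; exact hc
  | succ K ihK =>
      intro c hsplit hck hlen
      rcases Nat.lt_or_ge c (K + 1) with hlt | hge
      · -- c ≤ K: first pad to K, then split one group
        have hK : pvCanSplit K l m := ihK c hsplit (by omega) (by omega)
        obtain ⟨gs, hlenK, hflat, hgs⟩ := hK
        -- some group has ≥ 2 elements, else l.length ≤ K
        have hex : ∃ G ∈ gs, 2 ≤ G.length := by
          by_contra hno
          push_neg at hno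
          have hle : ∀ x ∈ gs.map List.length, x ≤ 1 := by
            intro x hx
            obtain ⟨G, hG, rfl⟩ := List.mem_map.mp hx
            have := hno G hG
            omega
          have hsum : (gs.map List.length).sum ≤ (gs.map List.length).length • 1 :=
            List.sum_le_card_nsmul _ 1 hle
          have : l.length = (gs.map List.length).sum := by
            rw [← hflat, List.length_flatten]
          simp at hsum
          omega
        obtain ⟨G, hGmem, hG2⟩ := hex
        obtain ⟨pre, post, rfl⟩ := List.append_of_mem hGmem
        obtain ⟨y, ys, rfl⟩ := List.exists_cons_of_ne_nil (hgs G hGmem).1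
        have hysne : ys ≠ [] := by
          intro h; rw [h] at hG2; simp at hG2
        have hsub : ∀ x ∈ y :: ys, 0 ≤ x := by
          intro x hx
          apply hl
          rw [← hflat]
          exact List.mem_flatten.mpr ⟨y :: ys, hGmem, hx⟩
        have hys0 : (0 : Int) ≤ ys.sum := List.sum_nonneg (fun x hx => hsub x (by simp [hx]))
        have hy0 : (0 : Int) ≤ y := hsub y (by simp)
        have hGsum : (y :: ys).sum ≤ m := (hgs _ hGmem).2
        simp only [List.sum_cons] at hGsum
        refine ⟨pre ++ [y] :: ys :: post, ?_, ?_, ?_⟩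
        · simp only [List.length_append, List.length_cons] at hlenK ⊢
          omega
        · rw [← hflat]
          simp
        · intro g hg
          simp only [List.mem_append, List.mem_cons] at hg
          rcases hg with hg | hg | hg | hg
          · exact hgs g (by simp [hg])
          · subst hg; exact ⟨by simp, by simp; omega⟩
          · subst hg; exact ⟨hysne, by omega⟩
          · exact hgs g (by simp [hg])
      · -- c = K + 1
        have : c = K + 1 := by omega
        subst this
        exact hsplit

theorem pvValid_mono (tasks : List Int) (workers : Int) (hnn : pvNonneg tasks)
    {m m' : Int} (hm : m ≤ m') (h : pvA_isValid tasks workers m = true) :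
    pvA_isValid tasks workers m' = true := by
  simp only [pvA_isValid, decide_eq_true_eq] at h ⊢
  exact le_trans (pvGCount_mono m m' hm tasks hnn) h

-- ---- binary search ----
theorem pvA_loop_spec (tasks : List Int) (workers : Int) (hnn : pvNonneg tasks) :
    ∀ (low high : Int), low ≤ high →
      low ≤ pvA_loop tasks workers low high ∧
      pvA_loop tasks workers low high ≤ high ∧
      (∀ m, low ≤ m → m < pvA_loop tasks workers low high → ¬ (pvA_isValid tasks workers m = true)) ∧
      (pvA_isValid tasks workers (pvA_loop tasks workers low high) = true ∨
        pvA_loop tasks workers low high = high) := by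
  intro low high
  induction low, high using pvA_loop.induct tasks workers with
  | case1 low high h mid htrue ih =>
      intro _
      have hfd : PySem.Int.floordiv (high - low) 2 = (high - low) / 2 :=
        PySem.Int.floordiv_eq_ediv_of_pos (by omega)
      have hmid1 : low ≤ mid := by simp only [mid, hfd]; omega
      have hmid2 : mid < high := by simp only [mid, hfd]; omega
      obtain ⟨i1, i2, i3, i4⟩ := ih (by omega)
      rw [pvA_loop]
      simp only [h, dif_pos]
      have hmideq : mid = low + PySem.Int.floordiv (high - low) 2 := rfl
      rw [← hmideq, if_pos htrue]
      refine ⟨i1, by omega, i3, ?_⟩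
      rcases i4 with hv | hv
      · exact Or.inl hv
      · exact Or.inl (by rw [hv]; exact htrue)
  | case2 low high h mid hfalse ih =>
      intro _
      have hfd : PySem.Int.floordiv (high - low) 2 = (high - low) / 2 :=
        PySem.Int.floordiv_eq_ediv_of_pos (by omega)
      have hmid1 : low ≤ mid := by simp only [mid, hfd]; omega
      have hmid2 : mid < high := by simp only [mid, hfd]; omega
      obtain ⟨i1, i2, i3, i4⟩ := ih (by omega)
      rw [pvA_loop]
      simp only [h, dif_pos]
      have hmideq : mid = low + PySem.Int.floordiv (high - low) 2 := rfl
      rw [← hmideq, if_neg hfalse]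
      refine ⟨by omega, i2, ?_, i4⟩
      intro q hq1 hq2 hqv
      by_cases hq : q < mid + 1
      · exact hfalse (pvValid_mono tasks workers hnn (show q ≤ mid by omega) hqv)
      · exact i3 q (by omega) hq2 hqv
  | case3 low high h =>
      intro hle
      have : low = high := by omega
      rw [pvA_loop, dif_neg h]
      exact ⟨le_refl _, by omega, by intro m h1 h2; omega, Or.inr this⟩

-- ---- B's prefix list ----
def pvPartials (acc : Int) : List Int → List Int
  | [] => []
  | x :: r => (acc + x) :: pvPartials (acc + x) r

theorem pvPrefixFold (l : List Int) : ∀ (acc : Int) (pl : List Int),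
    (l.foldl (fun (st : List Int × Int) t => (st.1 ++ [st.2 + t], st.2 + t)) (pl, acc)).1
      = pl ++ pvPartials acc l := by
  induction l with
  | nil => intro acc pl; simp [pvPartials]
  | cons x r ih =>
      intro acc pl
      simp only [List.foldl_cons, pvPartials]
      rw [ih (acc + x) (pl ++ [acc + x])]
      simp

theorem pvPartials_getD (l : List Int) : ∀ (acc : Int) (i : Nat), i < l.length →
    (pvPartials acc l).getD i 0 = acc + (l.take (i + 1)).sum := by
  induction l with
  | nil => intro acc i hi; simp at hi
  | cons x r ih =>
      intro acc i hi
      cases i with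
      | zero => simp [pvPartials]
      | succ i' =>
          simp only [pvPartials, List.getD_cons_succ]
          rw [ih (acc + x) i' (by simpa using hi)]
          simp only [List.take_succ_cons, List.sum_cons]
          ring

-- pre.getD i 0 = sum of the first i tasks
theorem pvPre_getD (tasks : List Int) (i : Nat) (hi : i ≤ tasks.length) :
    ((0 : Int) :: pvPartials 0 tasks).getD i 0 = (tasks.take i).sum := by
  cases i with
  | zero => simp
  | succ i' =>
      simp only [List.getD_cons_succ]
      rw [pvPartials_getD tasks 0 i' (by omega)]
      simp

theorem pvPre_len (tasks : List Int) :
    ((0 : Int) :: pvPartials 0 tasks).length = tasks.length + 1 := by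
  have : ∀ (l : List Int) (acc : Int), (pvPartials acc l).length = l.length := by
    intro l
    induction l with
    | nil => intro acc; simp [pvPartials]
    | cons x r ih => intro acc; simp [pvPartials, ih]
  simp [this]

-- ---- B's inner min loop ----
theorem pvMinFold_spec (f : Int → Int) (l : List Int) (hne : l ≠ []) :
    ∃ v, pvMinFold f l = some v ∧ (∃ p ∈ l, v = f p) ∧ ∀ p ∈ l, v ≤ f p := by
  have aux : ∀ (l : List Int) (b : Int),
      ∃ v, (l.foldl (fun best p =>
        match best with
        | none => some (f p)
        | some b => if f p < b then some (f p) else some b) (some b)) = some v ∧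
        v ≤ b ∧ (v = b ∨ ∃ p ∈ l, v = f p) ∧ ∀ p ∈ l, v ≤ f p := by
    intro l
    induction l with
    | nil => intro b; exact ⟨b, rfl, le_refl _, Or.inl rfl, by simp⟩
    | cons x r ih =>
        intro b
        simp only [List.foldl_cons]
        by_cases h : f x < b
        · simp only [h, if_pos]
          obtain ⟨v, hv, hvb, hvor, hvall⟩ := ih (f x)
          refine ⟨v, hv, by omega, ?_, ?_⟩
          · rcases hvor with rfl | ⟨p, hp, rfl⟩
            · exact Or.inr ⟨x, by simp, rfl⟩
            · exact Or.inr ⟨p, by simp [hp], rfl⟩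
          · intro p hp
            rcases List.mem_cons.mp hp with rfl | hp
            · omega
            · exact hvall p hp
        · simp only [h, if_neg, if_false]
          obtain ⟨v, hv, hvb, hvor, hvall⟩ := ih b
          refine ⟨v, hv, hvb, ?_, ?_⟩
          · rcases hvor with rfl | ⟨p, hp, rfl⟩
            · exact Or.inl rfl
            · exact Or.inr ⟨p, by simp [hp], rfl⟩
          · intro p hp
            rcases List.mem_cons.mp hp with rfl | hp
            · omega
            · exact hvall p hp
  obtain ⟨x, r, rfl⟩ := List.exists_cons_of_ne_nil hne
  unfold pvMinFold
  simp only [List.foldl_cons]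
  obtain ⟨v, hv, hvb, hvor, hvall⟩ := aux r (f x)
  refine ⟨v, hv, ?_, ?_⟩
  · rcases hvor with rfl | ⟨p, hp, rfl⟩
    · exact ⟨x, by simp, rfl⟩
    · exact ⟨p, by simp [hp], rfl⟩
  · intro p hp
    rcases List.mem_cons.mp hp with rfl | hp
    · omega
    · exact hvall p hp

-- ---- B's row of index assignments ----
theorem pvGetD_set (L : List Int) (mIdx : Nat) (v : Int) (i : Nat) :
    (L.set mIdx v).getD i 0 = if mIdx = i ∧ mIdx < L.length then v else L.getD i 0 := by
  simp only [List.getD_eq_getElem?_getD, List.getElem?_set]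
  split_ifs with h1 h2 h3 <;> simp_all
  omega

theorem pvSetFold (f : Int → Int) : ∀ (a b : Int) (L : List Int), 0 ≤ a →
    (((PySem.List.pyRange a b 1).foldl (fun l i => l.set i.toNat (f i)) L).length = L.length ∧
     ∀ (i : Nat), ((PySem.List.pyRange a b 1).foldl (fun l i => l.set i.toNat (f i)) L).getD i 0 =
       if a ≤ (i : Int) ∧ (i : Int) < b ∧ i < L.length then f i else L.getD i 0) := by
  intro a b L ha
  induction hn : (b - a).toNat generalizing a L with
  | zero =>
      rw [PySem.List.pyRange_one_eq_nil (by omega)]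
      refine ⟨rfl, fun i => ?_⟩
      simp only [List.foldl_nil]
      rw [if_neg (by omega)]
  | succ n ih =>
      rw [PySem.List.pyRange_one_cons (by omega)]
      simp only [List.foldl_cons]
      obtain ⟨hlen, hget⟩ := ih (a + 1) (L.set a.toNat (f a)) (by omega) (by omega)
      refine ⟨by rw [hlen]; simp, fun i => ?_⟩
      rw [hget i]
      by_cases hi : (i : Int) = a
      · rw [if_neg (by simp only [List.length_set]; omega), pvGetD_set]
        by_cases hlen2 : i < L.length
        · rw [if_pos ⟨by omega, by omega⟩, if_pos ⟨by omega, by omega, hlen2⟩]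
          rw [show a = (i : Int) from by omega]
        · rw [if_neg (by omega), if_neg (by omega)]
      · rw [pvGetD_set,
          if_neg (show ¬(a.toNat = i ∧ a.toNat < L.length) from by omega)]
        simp only [List.length_set]
        split_ifs with h1 h2 h2 <;> first | rfl | (exfalso; omega)

-- ---- DP row invariant ----
def pvAchieve (tasks : List Int) (j i : Nat) (v : Int) : Prop := pvCanSplit j (tasks.take i) v

def pvLower (tasks : List Int) (j i : Nat) (v : Int) : Prop :=
  ∀ gs : List (List Int), gs.length = j → gs.flatten = tasks.take i →
    (∀ g ∈ gs, g ≠ []) → ∃ g ∈ gs, v ≤ g.sum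

def pvRowInv (tasks : List Int) (j : Nat) (dp : List Int) : Prop :=
  dp.length = tasks.length + 1 ∧
  ∀ i : Nat, j ≤ i → i ≤ tasks.length →
    pvAchieve tasks j i (dp.getD i 0) ∧ pvLower tasks j i (dp.getD i 0)

theorem pvSeg_sum (l : List Int) (p i : Nat) (hpi : p ≤ i) :
    (l.take i).sum - (l.take p).sum = ((l.take i).drop p).sum := by
  conv_lhs => rw [← List.take_append_drop p (l.take i)]
  rw [List.sum_append, List.take_take, min_eq_left hpi]
  ring

theorem pvRowInv_one (tasks : List Int) (hne : tasks ≠ []) :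
    pvRowInv tasks 1 ((0 : Int) :: pvPartials 0 tasks) := by
  refine ⟨pvPre_len tasks, ?_⟩
  intro i hi1 hin
  rw [pvPre_getD tasks i hin]
  have htne : tasks.take i ≠ [] := by
    simp only [ne_eq, List.take_eq_nil_iff]
    push_neg
    exact ⟨by omega, hne⟩
  constructor
  · exact ⟨[tasks.take i], by simp, by simp, by simp [htne]⟩
  · intro gs hlen hflat _
    obtain ⟨g, rfl⟩ := List.length_eq_one_iff.mp hlen
    refine ⟨g, by simp, ?_⟩
    simp only [List.flatten_cons, List.flatten_nil, List.append_nil] at hflat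
    rw [hflat]

theorem pvRowInv_step (tasks : List Int)
    (j : Nat) (hj : 1 ≤ j) (dp : List Int)
    (hinv : pvRowInv tasks j dp) :
    pvRowInv tasks (j + 1) (pvB_row dp ((0 : Int) :: pvPartials 0 tasks) tasks.length ((j : Int) + 1)) := by
  obtain ⟨hdplen, hdp⟩ := hinv
  have hn1 : tasks.length + 1 = (List.replicate (tasks.length + 1) (0 : Int)).length := by simp
  obtain ⟨hrlen, hrget⟩ := pvSetFold (fun i => pvB_best dp ((0 : Int) :: pvPartials 0 tasks) ((j : Int) + 1) i)
    ((j : Int) + 1) ((tasks.length : Int) + 1) (List.replicate (tasks.length + 1) 0) (by omega)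
  constructor
  · unfold pvB_row
    rw [hrlen]; simp
  intro i hi1 hin
  have hgeti : (pvB_row dp ((0 : Int) :: pvPartials 0 tasks) tasks.length ((j : Int) + 1)).getD i 0
      = pvB_best dp ((0 : Int) :: pvPartials 0 tasks) ((j : Int) + 1) (i : Int) := by
    unfold pvB_row
    rw [hrget i, if_pos ⟨by omega, by omega, by simp; omega⟩]
  rw [hgeti]
  -- characterise pvB_best via the min-fold
  have hrange : PySem.List.pyRange ((j : Int) + 1 - 1) (i : Int) 1 ≠ [] := by
    have : ((j : Int)) ∈ PySem.List.pyRange ((j : Int) + 1 - 1) (i : Int) 1 := by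
      rw [PySem.List.mem_pyRange_one]
      omega
    intro h; rw [h] at this; simp at this
  obtain ⟨v, hv, ⟨p0, hp0mem, hp0eq⟩, hvall⟩ :=
    pvMinFold_spec (fun p => max (PySem.List.pyGetD dp p 0)
      (PySem.List.pyGetD ((0 : Int) :: pvPartials 0 tasks) (i : Int) 0 -
        PySem.List.pyGetD ((0 : Int) :: pvPartials 0 tasks) p 0))
      (PySem.List.pyRange ((j : Int) + 1 - 1) (i : Int) 1) hrange
  have hbesteq : pvB_best dp ((0 : Int) :: pvPartials 0 tasks) ((j : Int) + 1) (i : Int) = v := by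
    unfold pvB_best
    rw [hv]
    rfl
  rw [hbesteq]
  -- index and sum conversions
  have hcast : ∀ (p : Int), p ∈ PySem.List.pyRange ((j : Int) + 1 - 1) (i : Int) 1 →
      (max (PySem.List.pyGetD dp p 0)
        (PySem.List.pyGetD ((0 : Int) :: pvPartials 0 tasks) (i : Int) 0 -
         PySem.List.pyGetD ((0 : Int) :: pvPartials 0 tasks) p 0))
      = max (dp.getD p.toNat 0) ((tasks.take i).sum - (tasks.take p.toNat).sum) := by
    intro p hp
    rw [PySem.List.mem_pyRange_one] at hp
    have hp0 : 0 ≤ p := by omega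
    have hpn : p.toNat ≤ tasks.length := by omega
    rw [show p = ((p.toNat : Nat) : Int) from by omega]
    rw [PySem.List.pyGetD_natCast, PySem.List.pyGetD_natCast, PySem.List.pyGetD_natCast]
    rw [pvPre_getD tasks i hin, pvPre_getD tasks p.toNat hpn]
    rw [show ((p.toNat : Nat) : Int).toNat = p.toNat from by omega]
  have hp0r := hp0mem
  rw [PySem.List.mem_pyRange_one] at hp0r
  have hp0n : p0.toNat ≤ tasks.length := by omega
  have hjp0 : j ≤ p0.toNat := by omega
  have hp0i : p0.toNat < i := by omega
  rw [hcast p0 hp0mem] at hp0eq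
  have hlentake : (tasks.take i).length = i := by simp; omega
  constructor
  · -- achieve
    obtain ⟨hach, _⟩ := hdp p0.toNat hjp0 hp0n
    obtain ⟨gs, hglen, hgflat, hggood⟩ := hach
    refine ⟨gs ++ [(tasks.take i).drop p0.toNat], by simp [hglen], ?_, ?_⟩
    · rw [List.flatten_append]
      simp only [List.flatten_cons, List.flatten_nil, List.append_nil]
      rw [hgflat, show tasks.take p0.toNat = (tasks.take i).take p0.toNat by
        rw [List.take_take, min_eq_left (by omega)]]
      exact List.take_append_drop _ _
    · intro g hg
      rcases List.mem_append.mp hg with hg | hg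
      · obtain ⟨h1, h2⟩ := hggood g hg
        exact ⟨h1, le_trans h2 (le_trans (le_max_left _ _) (le_of_eq hp0eq.symm))⟩
      · simp only [List.mem_singleton] at hg
        subst hg
        refine ⟨?_, ?_⟩
        · simp only [ne_eq, List.drop_eq_nil_iff]
          omega
        · rw [← pvSeg_sum tasks p0.toNat i (by omega)]
          exact le_trans (le_max_right _ _) (le_of_eq hp0eq.symm)
  · -- lower
    intro gs hglen hgflat hgne2
    rcases List.eq_nil_or_concat gs with rfl | ⟨gs', L, rfl⟩
    · simp at hglen
    have hLne : L ≠ [] := hgne2 L (by simp)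
    have hgs'ne : ∀ g ∈ gs', g ≠ [] := fun g hg => hgne2 g (by simp [hg])
    have hgs'len : gs'.length = j := by simpa using hglen
    set p := gs'.flatten.length with hp
    have hflat2 : gs'.flatten ++ L = tasks.take i := by simpa using hgflat
    have hpL : p + L.length = i := by
      have h := congrArg List.length hflat2
      rw [List.length_append, hlentake, ← hp] at h
      exact h
    have hLpos : 1 ≤ L.length := List.length_pos_iff.mpr hLne
    have hjp : j ≤ p := by
      have := pvSplit_len_le gs' hgs'ne
      omega
    have hpi : p < i := by omega
    have hgs'flat : gs'.flatten = tasks.take p := by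
      have h1 : (tasks.take i).take p = gs'.flatten := by
        rw [← hflat2, List.take_left']
        rfl
      rw [← h1, List.take_take, min_eq_left (by omega)]
    have hLsum : L.sum = (tasks.take i).sum - (tasks.take p).sum := by
      have := congrArg List.sum hflat2
      rw [List.sum_append, hgs'flat] at this
      omega
    have hpmem : ((p : Nat) : Int) ∈ PySem.List.pyRange ((j : Int) + 1 - 1) (i : Int) 1 := by
      rw [PySem.List.mem_pyRange_one]
      omega
    have hvle := hvall _ hpmem
    rw [hcast _ hpmem] at hvle
    simp only [Int.toNat_natCast] at hvle
    obtain ⟨_, hlow⟩ := hdp p hjp (by omega)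
    obtain ⟨G, hGmem, hGle⟩ := hlow gs' hgs'len hgs'flat hgs'ne
    rcases le_max_iff.mp hvle with hcase | hcase
    · exact ⟨G, by simp [hGmem], le_trans hcase hGle⟩
    · exact ⟨L, by simp, by omega⟩

-- fold of rows 2..k keeps the invariant
theorem pvDP_inv (tasks : List Int) (hne : tasks ≠ [])
    (k : Nat) (hk : 1 ≤ k) (hkn : k ≤ tasks.length) :
    pvRowInv tasks k
      ((PySem.List.pyRange 2 ((k : Int) + 1) 1).foldl
        (fun dp j => pvB_row dp ((0 : Int) :: pvPartials 0 tasks) tasks.length j)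
        ((0 : Int) :: pvPartials 0 tasks)) := by
  revert hkn
  induction k, hk using Nat.le_induction with
  | base =>
      intro _
      rw [show ((1 : Nat) : Int) + 1 = 2 from by norm_num,
        PySem.List.pyRange_one_eq_nil (by omega)]
      simp only [List.foldl_nil]
      exact pvRowInv_one tasks hne
  | succ K hK ih =>
      intro hK1n
      have hKn : K ≤ tasks.length := by omega
      have hsplit : PySem.List.pyRange 2 (((K + 1 : Nat) : Int) + 1) 1
          = PySem.List.pyRange 2 ((K : Int) + 1) 1 ++ [(K : Int) + 1] := by
        rw [show (((K + 1 : Nat) : Int) + 1) = ((K : Int) + 1) + 1 from by push_cast; ring]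
        exact PySem.List.pyRange_one_succ_right (show (2:Int) ≤ (K : Int) + 1 from by omega)
      rw [hsplit, List.foldl_append]
      simp only [List.foldl_cons, List.foldl_nil]
      have hstep := pvRowInv_step tasks K hK
        ((PySem.List.pyRange 2 ((K : Int) + 1) 1).foldl
          (fun dp j => pvB_row dp ((0 : Int) :: pvPartials 0 tasks) tasks.length j)
          ((0 : Int) :: pvPartials 0 tasks)) (ih hKn)
      exact hstep

-- ---- the workers ≥ len(tasks) regime (no sign assumptions) ----
theorem pvRun_count_le (m : Int) : ∀ (l : List Int) (c t : Int),
    (pvRun m (c, t) l).1 ≤ c + (l.length : Int) := by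
  intro l
  induction l with
  | nil => intro c t; simp [pvRun_nil]
  | cons x r ih =>
      intro c t
      rw [pvRun_cons]
      by_cases h : t + x > m
      · simp only [h, if_pos]
        have := ih (c + 1) x
        simp only [List.length_cons]
        push_cast
        omega
      · simp only [h, if_neg, gt_iff_lt, not_lt, if_false]
        have := ih c (t + x)
        simp only [List.length_cons]
        push_cast
        omega

theorem pvGCount_le_len (m x : Int) (r : List Int) (hx : x ≤ m) :
    pvGCount m (x :: r) ≤ 1 + (r.length : Int) := by
  unfold pvGCount
  rw [pvRun_cons]
  simp only [show ¬((0:Int) + x > m) from by omega, if_neg, gt_iff_lt, not_lt, if_false]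
  simpa using pvRun_count_le m r 1 (0 + x)

theorem pvA_loop_ge (tasks : List Int) (workers : Int) : ∀ (low high : Int),
    (∀ m, low ≤ m → m < high → pvA_isValid tasks workers m = true) →
    pvA_loop tasks workers low high = low := by
  intro low high
  induction low, high using pvA_loop.induct tasks workers with
  | case1 low high h mid htrue ih =>
      intro hall
      have hfd : PySem.Int.floordiv (high - low) 2 = (high - low) / 2 :=
        PySem.Int.floordiv_eq_ediv_of_pos (by omega)
      have hmid1 : low ≤ mid := by simp only [mid, hfd]; omega
      have hmid2 : mid < high := by simp only [mid, hfd]; omega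
      rw [pvA_loop]
      simp only [h, dif_pos]
      have hmideq : mid = low + PySem.Int.floordiv (high - low) 2 := rfl
      rw [← hmideq, if_pos htrue]
      exact ih (fun m h1 h2 => hall m h1 (by omega))
  | case2 low high h mid hfalse ih =>
      intro hall
      have hfd : PySem.Int.floordiv (high - low) 2 = (high - low) / 2 :=
        PySem.Int.floordiv_eq_ediv_of_pos (by omega)
      have hmid1 : low ≤ mid := by simp only [mid, hfd]; omega
      have hmid2 : mid < high := by simp only [mid, hfd]; omega
      exact absurd (hall mid hmid1 hmid2) hfalse
  | case3 low high h =>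
      intro _
      rw [pvA_loop, dif_neg h]

theorem pvAllSingleton : ∀ (gs : List (List Int)), (∀ G ∈ gs, G ≠ []) →
    gs.flatten.length = gs.length → ∀ G ∈ gs, G.length = 1 := by
  intro gs
  induction gs with
  | nil => simp
  | cons G rest ih =>
      intro hgood hlen
      have h1 : 1 ≤ G.length :=
        Nat.one_le_iff_ne_zero.mpr (by simpa using hgood G (by simp))
      have h2 : rest.length ≤ rest.flatten.length :=
        pvSplit_len_le rest (fun g hg => hgood g (by simp [hg]))
      simp only [List.flatten_cons, List.length_append, List.length_cons] at hlen
      intro G' hG'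
      rcases List.mem_cons.mp hG' with rfl | hG'
      · omega
      · exact ih (fun g hg => hgood g (by simp [hg])) (by omega) G' hG'

theorem pvFlattenSingletons (l : List Int) : (l.map (fun x => [x])).flatten = l := by
  induction l with
  | nil => simp
  | cons x r ih => simp [ih]

-- ===== VERDICT (by name: the statement is the Claim_ definition above) =====
theorem min_time_to_complete_tasks_spec : Claim_equal_min_time_to_complete_tasks := by
  unfold Claim_equal_min_time_to_complete_tasks
  intro tasks workers _ hpre
  unfold Spec_min_time_to_complete_tasks
  obtain ⟨hne, hor⟩ := hpre
  have hn1 : 1 ≤ tasks.length := List.length_pos_iff.mpr hne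
  -- the maximum element
  cases hmax : PySem.List.max? tasks (fun y => y) with
  | none =>
      exact absurd ((PySem.List.max?_eq_none_iff tasks (fun y => y)).mp hmax) hne
  | some M =>
  have hMmem : M ∈ tasks := PySem.List.max?_mem hmax
  have hMmax : ∀ y ∈ tasks, y ≤ M := PySem.List.max?_isMax hmax
  -- A's value is the binary-search loop result
  have hAeq : min_time_to_complete_tasks tasks workers = pvA_loop tasks workers M tasks.sum := by
    unfold min_time_to_complete_tasks
    rw [hmax]
  -- B's value is the DP table entry
  have hpre_eq : (tasks.foldl (fun (st : List Int × Int) t =>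
      (st.1 ++ [st.2 + t], st.2 + t)) (([0], 0) : List Int × Int)).1
      = (0 : Int) :: pvPartials 0 tasks := by
    simpa using pvPrefixFold tasks 0 [0]
  have hBeq : min_time_to_complete_tasks_alt tasks workers =
      PySem.List.pyGetD
        ((PySem.List.pyRange 2 (min workers (tasks.length : Int) + 1) 1).foldl
          (fun dp j => pvB_row dp ((0 : Int) :: pvPartials 0 tasks) tasks.length j)
          ((0 : Int) :: pvPartials 0 tasks)) (tasks.length : Int) 0 := by
    simp only [min_time_to_complete_tasks_alt]
    rw [hpre_eq]
  rw [hAeq, hBeq]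
  rcases hor with hnn' | hwn
  · -- nonnegative durations, any workers
    have hnn : pvNonneg tasks := hnn'
    have hM0 : 0 ≤ M := hnn M hMmem
    have hMS : M ≤ tasks.sum := List.single_le_sum (fun x hx => hnn x hx) M hMmem
    obtain ⟨h1, h2, h3, h4⟩ := pvA_loop_spec tasks workers hnn M tasks.sum hMS
    by_cases hw : workers ≤ 0
    · -- workers ≤ 0: no split is ever valid, both sides return sum(tasks)
      have hnovalid : ∀ m, ¬ pvA_isValid tasks workers m = true := by
        intro m h
        simp only [pvA_isValid, decide_eq_true_eq] at h
        have := pvGCount_pos m tasks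
        unfold pvGCount at this
        omega
      have hAS : pvA_loop tasks workers M tasks.sum = tasks.sum := by
        rcases h4 with hv | hv
        · exact absurd hv (hnovalid _)
        · exact hv
      have hkle : min workers (tasks.length : Int) + 1 ≤ 2 := by
        have := min_le_left workers (tasks.length : Int)
        omega
      rw [hAS, PySem.List.pyRange_one_eq_nil hkle]
      simp only [List.foldl_nil, PySem.List.pyGetD_natCast]
      rw [pvPre_getD tasks tasks.length (le_refl _), List.take_length]
    · -- workers ≥ 1
      have hkZ0 : 1 ≤ min workers (tasks.length : Int) := by omega
      set kN := (min workers (tasks.length : Int)).toNat with hkN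
      have hkNcast : ((kN : Nat) : Int) = min workers (tasks.length : Int) := by
        rw [hkN]; omega
      have hkN1 : 1 ≤ kN := by omega
      have hkNn : kN ≤ tasks.length := by
        have := min_le_right workers (tasks.length : Int)
        omega
      -- the DP invariant at the last row
      obtain ⟨hdplen, hdp⟩ := pvDP_inv tasks hne kN hkN1 hkNn
      obtain ⟨hach, hlow⟩ := hdp tasks.length hkNn (le_refl _)
      rw [← hkNcast]
      simp only [PySem.List.pyGetD_natCast]
      set bv := ((PySem.List.pyRange 2 ((kN : Int) + 1) 1).foldl
        (fun dp j => pvB_row dp ((0 : Int) :: pvPartials 0 tasks) tasks.length j)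
        ((0 : Int) :: pvPartials 0 tasks)).getD tasks.length 0 with hbv
      unfold pvAchieve pvCanSplit at hach
      unfold pvLower at hlow
      rw [List.take_length] at hach hlow
      obtain ⟨gs, hglen, hgflat, hggood⟩ := hach
      -- bv is at least the maximum element
      have hMbv : M ≤ bv := by
        obtain ⟨G, hGgs, hMG⟩ := List.mem_flatten.mp (hgflat ▸ hMmem)
        have hGnn : ∀ x ∈ G, (0:Int) ≤ x := by
          intro x hx
          exact hnn x (hgflat ▸ List.mem_flatten.mpr ⟨G, hGgs, hx⟩)
        exact le_trans (List.single_le_sum hGnn M hMG) ((hggood G hGgs).2)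
      -- bv is a valid cap
      have hvbv : pvA_isValid tasks workers bv = true := by
        simp only [pvA_isValid, decide_eq_true_eq]
        have hopt := pvGreedy_opt bv gs hggood (by rw [hgflat]; exact hnn)
          (by intro h; rw [h] at hglen; simp at hglen; omega)
        rw [hgflat, hglen] at hopt
        have : (kN : Int) ≤ workers := by
          rw [hkNcast]; exact min_le_left _ _
        unfold pvGCount at hopt
        omega
      -- A's result is valid (sum is always a valid cap when workers ≥ 1)
      have hvS : pvA_isValid tasks workers tasks.sum = true := by
        simp only [pvA_isValid, decide_eq_true_eq]
        rw [pvRun_no_break tasks.sum 1 0 tasks hnn (by omega)]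
        omega
      have hva : pvA_isValid tasks workers (pvA_loop tasks workers M tasks.sum) = true := by
        rcases h4 with hv | hv
        · exact hv
        · rw [hv]; exact hvS
      -- a ≤ bv by minimality of the binary search
      have hab : pvA_loop tasks workers M tasks.sum ≤ bv := by
        by_contra hcon
        exact h3 bv hMbv (by omega) hvbv
      -- bv ≤ a via the greedy partition, padded to exactly kN groups
      have hba : bv ≤ pvA_loop tasks workers M tasks.sum := by
        set a := pvA_loop tasks workers M tasks.sum with ha
        have hbound : ∀ x ∈ tasks, x ≤ a := fun x hx => le_trans (hMmax x hx) h1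
        obtain ⟨gsA, hAflat, hAgood, hAcount⟩ := pvGreedy_split a tasks hnn hbound hne
        have hcw : (gsA.length : Int) ≤ workers := by
          simp only [pvA_isValid, decide_eq_true_eq] at hva
          unfold pvGCount at hAcount
          omega
        have hcn : gsA.length ≤ tasks.length := by
          have := pvSplit_len_le gsA (fun g hg => (hAgood g hg).1)
          rw [hAflat] at this
          exact this
        have hckN : gsA.length ≤ kN := by omega
        obtain ⟨gs2, hg2len, hg2flat, hg2good⟩ :=
          pvSplit_pad a tasks hnn kN gsA.length ⟨gsA, rfl, hAflat, hAgood⟩ hckN hkNn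
        obtain ⟨G, hGmem, hbvG⟩ := hlow gs2 hg2len hg2flat (fun g hg => (hg2good g hg).1)
        exact le_trans hbvG ((hg2good G hGmem).2)
      omega
  · -- workers ≥ len(tasks): every cap ≥ max is valid, both sides return max(tasks)
    have hvalidall : ∀ m, M ≤ m → pvA_isValid tasks workers m = true := by
      intro m hm
      simp only [pvA_isValid, decide_eq_true_eq]
      obtain ⟨x, r, hxr⟩ := List.exists_cons_of_ne_nil hne
      have hx : x ≤ m := le_trans (hMmax x (by rw [hxr]; simp)) hm
      have hcnt := pvGCount_le_len m x r hx
      rw [← hxr] at hcnt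
      unfold pvGCount at hcnt
      have : (tasks.length : Int) = 1 + (r.length : Int) := by
        simp [hxr]; push_cast; ring
      omega
    have hA : pvA_loop tasks workers M tasks.sum = M :=
      pvA_loop_ge tasks workers M tasks.sum (fun m h1 _ => hvalidall m h1)
    rw [hA, min_eq_right hwn]
    -- the DP invariant at row n = len(tasks)
    obtain ⟨hdplen, hdp⟩ := pvDP_inv tasks hne tasks.length hn1 (le_refl _)
    obtain ⟨hach, hlow⟩ := hdp tasks.length (le_refl _) (le_refl _)
    simp only [PySem.List.pyGetD_natCast]
    set bv := ((PySem.List.pyRange 2 ((tasks.length : Int) + 1) 1).foldl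
      (fun dp j => pvB_row dp ((0 : Int) :: pvPartials 0 tasks) tasks.length j)
      ((0 : Int) :: pvPartials 0 tasks)).getD tasks.length 0 with hbv
    unfold pvAchieve pvCanSplit at hach
    unfold pvLower at hlow
    rw [List.take_length] at hach hlow
    obtain ⟨gs, hglen, hgflat, hggood⟩ := hach
    -- every group in the achieved split is a singleton, so max ≤ bv
    have hsing : ∀ G ∈ gs, G.length = 1 := by
      apply pvAllSingleton gs (fun g hg => (hggood g hg).1)
      rw [hgflat, hglen]
    have hMbv : M ≤ bv := by
      obtain ⟨G, hGgs, hMG⟩ := List.mem_flatten.mp (hgflat ▸ hMmem)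
      obtain ⟨y, hy⟩ := List.length_eq_one_iff.mp (hsing G hGgs)
      rw [hy] at hMG
      simp only [List.mem_singleton] at hMG
      subst hMG
      have := (hggood G hGgs).2
      rw [hy] at this
      simpa using this
    -- the singleton split bounds bv from above by max
    have hbvM : bv ≤ M := by
      obtain ⟨g, hgmem, hble⟩ := hlow (tasks.map (fun x => [x])) (by simp)
        (by rw [pvFlattenSingletons]) (by intro g hg; obtain ⟨x, _, rfl⟩ := List.mem_map.mp hg; simp)
      obtain ⟨x, hx, rfl⟩ := List.mem_map.mp hgmem
      simp only [List.sum_cons, List.sum_nil, add_zero] at hble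
      exact le_trans hble (hMmax x hx)
    omega
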